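-- pv_equiv track=rewrite | github.com/Son0-0/Algorithm | PROGRAMMERS/신규 아이디 추천.py | solution
-- ===== SOURCE A (Python) =====
-- def solution(new_id):
--     answer = ''
--
--     # 1 phase
--     new_id = new_id.lower()
--
--     # 2 phase
--     new_id = ''.join([c for c in new_id if c.isdigit()
--                      or c.isalpha() or c in '-_.'])
--     # 3 phase
--     for _ in range(len(new_id)):
--         new_id = new_id.replace('..', '.')
--
--     # 4 phase
--     new_id = phase4(new_id)
--
--     # 5 phase
--     if not new_id:
--         new_id = 'a'
--
--     # 6 phase
--     if 16 <= len(new_id):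
--         new_id = new_id[:15]
--         new_id = phase4(new_id)
--
--     # 7 phase
--     length = len(new_id)
--     if length <= 2:
--         new_id += new_id[-1] * (3 - length)
--
--     return new_id
--
-- def phase4(new_id):
--     # 4 phase
--     if new_id and new_id[0] == '.':
--         new_id = new_id[1:]
--     if new_id and new_id[-1] == '.':
--         new_id = new_id[:-1]
--
--     return new_id
-- ===== SOURCE B (Python) =====
-- def solution(new_id):
--     # One linear scan builds the filtered, dot-collapsed, no-leading-dot id;
--     # then trailing-dot pops, truncation and padding are done on the list.
--     out = []
--     for c in new_id.lower():
--         if c.isalnum() or c == '-' or c == '_':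
--             out.append(c)
--         elif c == '.' and out and out[-1] != '.':
--             out.append(c)
--     if out and out[-1] == '.':
--         out.pop()
--     out = out[:15]
--     if out and out[-1] == '.':
--         out.pop()
--     if not out:
--         out = ['a']
--     if len(out) < 3:
--         out = (out + [out[-1]] * 3)[:3]
--     return ''.join(out)
-- ===== Notes on version B (the rewrite author's own statement) =====
-- stated objective: faster
-- what changed: A filters, then collapses dot runs by calling str.replace once per character of the filtered id, then strips boundary dots with a helper; B builds the cleaned id in one linear scan (append a char if it is alphanumeric, hyphen or underscore; append a dot only when the output is nonempty and does not already end in a dot), fusing the filter pass, the quadratic dot-collapse loop and the leading-dot strip into a single pass, followed by the same trailing-dot pop, truncation and padding steps.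
import Mathlib
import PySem

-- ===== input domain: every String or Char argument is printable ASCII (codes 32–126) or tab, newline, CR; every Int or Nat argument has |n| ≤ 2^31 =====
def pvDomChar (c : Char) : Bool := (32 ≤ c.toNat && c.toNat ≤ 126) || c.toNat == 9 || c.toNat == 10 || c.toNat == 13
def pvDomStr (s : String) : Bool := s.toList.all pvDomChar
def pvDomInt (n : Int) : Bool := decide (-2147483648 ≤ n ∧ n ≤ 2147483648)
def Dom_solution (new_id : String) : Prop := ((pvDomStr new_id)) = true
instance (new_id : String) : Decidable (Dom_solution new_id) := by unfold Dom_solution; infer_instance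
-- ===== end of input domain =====

-- B fuses A's filter pass and A's repeated '..'→'.' replace loop into one linear scan; same return value, no speed claim beyond what a timing run reports.

-- ===== PORT A =====
-- helper phase4: strip one leading '.' (new_id[0]) and one trailing '.' (new_id[-1])
def phase4 (s : List Char) : List Char :=
  let s1 := if s ≠ [] ∧ PySem.List.pyGet? s 0 = some '.' then PySem.List.slice s (some 1) none else s
  if s1 ≠ [] ∧ PySem.List.pyGet? s1 (-1) = some '.' then PySem.List.slice s1 none (some (-1)) else s1

def solution (new_id : String) : String :=
  -- 1 phase
  let s1 := PySem.Chars.lower new_id.toList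
  -- 2 phase: ''.join([c for c in new_id if c.isdigit() or c.isalpha() or c in '-_.'])
  let s2 := PySem.Chars.join [] ((s1.filter (fun c =>
      PySem.Chars.isdigit c || PySem.Chars.isalpha c || PySem.Chars.isIn [c] ['-', '_', '.'])).map (fun c => [c]))
  -- 3 phase: for _ in range(len(new_id)): new_id = new_id.replace('..', '.')
  let s3 := (List.range s2.length).foldl (fun t _ => PySem.Chars.replace t ['.', '.'] ['.']) s2
  -- 4 phase
  let s4 := phase4 s3
  -- 5 phase
  let s5 := if s4 = [] then ['a'] else s4
  -- 6 phase
  let s6 := if 16 ≤ s5.length then phase4 (PySem.List.slice s5 none (some 15)) else s5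
  -- 7 phase: new_id += new_id[-1] * (3 - length); the none arm is unreachable (s6 ≠ [] after phase 5)
  let s7 := if s6.length ≤ 2 then
      s6 ++ (match PySem.List.pyGet? s6 (-1) with
             | some c => List.replicate (3 - s6.length) c
             | none => [])
    else s6
  String.ofList s7

-- ===== PORT B =====
-- one step of B's single scan: append c if alnum/-/_; append '.' only when out is nonempty and does not already end in '.'
def bstep (out : List Char) (c : Char) : List Char :=
  if PySem.Chars.isalnum c || c = '-' || c = '_' then out ++ [c]
  else if c = '.' ∧ out ≠ [] ∧ out.getLast? ≠ some '.' then out ++ [c]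
  else out

def solution_alt (new_id : String) : String :=
  let out0 := (PySem.Chars.lower new_id.toList).foldl bstep []
  let out1 := if out0 ≠ [] ∧ out0.getLast? = some '.' then out0.dropLast else out0
  let out2 := out1.take 15
  let out3 := if out2 ≠ [] ∧ out2.getLast? = some '.' then out2.dropLast else out2
  let out4 := if out3 = [] then ['a'] else out3
  -- (out + [out[-1]] * 3)[:3]; the none arm is unreachable (out4 ≠ [])
  let out5 := if out4.length < 3 then
      (out4 ++ (match out4.getLast? with | some c => List.replicate 3 c | none => [])).take 3
    else out4
  String.ofList out5

-- ===== PRECONDITION & SPEC =====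
def Spec_solution (new_id : String) (out : String) : Prop := out = solution_alt new_id
instance (new_id : String) (out : String) : Decidable (Spec_solution new_id out) := by unfold Spec_solution; infer_instance

-- ===== CLAIM (what is proved, stated in full; the proofs are below) =====
def Claim_equal_solution : Prop := ∀ (new_id : String), Dom_solution new_id → Spec_solution new_id (solution new_id)

-- ===== LEMMAS AND PROOFS =====

-- canonical middle forms used by both directions of the proof
def dotAdd (c : Char) (X : List Char) : List Char := if c = '.' ∧ X.head? = some '.' then X else c :: X

def coll (l : List Char) : List Char := l.foldr dotAdd []

def NoDD (l : List Char) : Prop := l.IsChain (fun a b => ¬(a = '.' ∧ b = '.'))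

def stripL (s : List Char) : List Char := if s.head? = some '.' then s.tail else s

def stripR (s : List Char) : List Char := if s.getLast? = some '.' then s.dropLast else s

def pA (c : Char) : Bool := PySem.Chars.isalnum c || c = '-' || c = '_' || c = '.'

-- the one full pass of new_id.replace('..', '.')
def repF : List Char → List Char
  | [] => []
  | [c] => [c]
  | c :: d :: t => if c = '.' ∧ d = '.' then '.' :: repF t else c :: repF (d :: t)

-- fuel-indexed scan mirroring PySem.Chars.replace.go for old = "..", new = "."
def rep : Nat → List Char → List Char
  | 0, l => l
  | _ + 1, [] => []
  | fuel + 1, c :: t => if ['.', '.'].isPrefixOf (c :: t) then '.' :: rep fuel ((c :: t).drop 2)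
                        else c :: rep fuel t

theorem rep_nil : ∀ fuel : Nat, rep fuel [] = [] := by
  intro fuel; cases fuel <;> rfl

theorem go_eq (fuel : Nat) : ∀ (l acc : List Char),
    PySem.Chars.replace.go ['.', '.'] ['.'] fuel l acc = acc.reverse ++ rep fuel l := by
  induction fuel with
  | zero => intro l acc; rw [PySem.Chars.replace.go]; rfl
  | succ n ih =>
    intro l acc
    cases l with
    | nil =>
      rw [PySem.Chars.replace.go]
      simp [rep_nil]
      omega
    | cons c t =>
      rw [PySem.Chars.replace.go]
      by_cases h : ['.', '.'].isPrefixOf (c :: t) = true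
      · simp only [h, if_pos, rep, ih]
        simp
      · simp only [Bool.not_eq_true] at h
        simp only [h, Bool.false_eq_true, if_false, rep, ih]
        simp

theorem rep_eq_repF : ∀ (fuel : Nat) (l : List Char), l.length ≤ fuel → rep fuel l = repF l := by
  intro fuel
  induction fuel with
  | zero =>
    intro l h
    have : l = [] := List.length_eq_zero_iff.mp (Nat.le_zero.mp h)
    subst this; rfl
  | succ n ih =>
    intro l h
    match l with
    | [] => simp [rep_nil, repF]
    | [c] =>
      simp only [rep, repF, List.isPrefixOf, Bool.and_false, Bool.false_eq_true, if_false,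
        rep_nil]
    | c :: d :: t =>
      simp only [rep, repF]
      by_cases hc : c = '.' ∧ d = '.'
      · obtain ⟨h1, h2⟩ := hc; subst h1; subst h2
        have ht : t.length ≤ n := by simp at h; omega
        simp [List.isPrefixOf, ih t ht]
      · have hpre : (['.', '.'].isPrefixOf (c :: d :: t)) = false := by
          cases hb : ['.', '.'].isPrefixOf (c :: d :: t) with
          | false => rfl
          | true =>
            exfalso
            simp only [List.isPrefixOf, Bool.and_eq_true, beq_iff_eq] at hb
            exact hc ⟨hb.1.symm, hb.2.1.symm⟩
        rw [hpre]
        have ht : (d :: t).length ≤ n := by simp at h ⊢; omega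
        simp only [Bool.false_eq_true, if_false, if_neg hc, ih _ ht]

theorem replace_eq_repF (s : List Char) : PySem.Chars.replace s ['.', '.'] ['.'] = repF s := by
  rw [PySem.Chars.replace]
  simp only [List.isEmpty_cons]
  rw [go_eq, rep_eq_repF s.length s le_rfl]
  rfl

theorem coll_cons (c : Char) (l : List Char) : coll (c :: l) = dotAdd c (coll l) := rfl

theorem dotAdd_dot_idem (X : List Char) : dotAdd '.' (dotAdd '.' X) = dotAdd '.' X := by
  unfold dotAdd
  by_cases h : X.head? = some '.'
  · simp [h]
  · simp [h]

theorem coll_repF (l : List Char) : coll (repF l) = coll l := by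
  induction l using repF.induct with
  | case1 => rfl
  | case2 c => rfl
  | case3 c d t h ih =>
    obtain ⟨hc, hd⟩ := h
    subst hc; subst hd
    show coll (repF ('.' :: '.' :: t)) = dotAdd '.' (coll ('.' :: t))
    rw [repF, if_pos (show ('.' : Char) = '.' ∧ ('.' : Char) = '.' from ⟨rfl, rfl⟩),
      coll_cons, ih, coll_cons, dotAdd_dot_idem]
  | case4 c d t h ih =>
    simp only [repF, if_neg h, coll_cons, ih]

theorem noDD_tail_pair {c : Char} {l : List Char} (h : NoDD (c :: l)) :
    (∀ y ∈ l.head?, ¬(c = '.' ∧ y = '.')) ∧ NoDD l := by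
  exact List.isChain_cons.mp h

theorem repF_of_noDD : ∀ l : List Char, NoDD l → repF l = l := by
  intro l
  induction l using repF.induct with
  | case1 => intro _; rfl
  | case2 c => intro _; rfl
  | case3 c d t h _ =>
    intro hn
    exact absurd h ((noDD_tail_pair hn).1 d rfl)
  | case4 c d t h ih =>
    intro hn
    simp only [repF, if_neg h, ih (noDD_tail_pair hn).2]

theorem repF_len_le : ∀ l : List Char, (repF l).length ≤ l.length := by
  intro l
  induction l using repF.induct with
  | case1 => simp [repF]
  | case2 c => simp [repF]
  | case3 c d t h ih => simp only [repF, if_pos h, List.length_cons]; simp at ih ⊢; omega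
  | case4 c d t h ih => simp only [repF, if_neg h, List.length_cons]; simp at ih ⊢; omega

theorem repF_len_lt : ∀ l : List Char, ¬ NoDD l → (repF l).length < l.length := by
  intro l
  induction l using repF.induct with
  | case1 => intro h; exact absurd List.isChain_nil h
  | case2 c => intro h; exact absurd (List.isChain_singleton c) h
  | case3 c d t h _ =>
    intro _
    have := repF_len_le t
    simp only [repF, if_pos h, List.length_cons]
    omega
  | case4 c d t h ih =>
    intro hn
    have hnt : ¬ NoDD (d :: t) := by
      intro hdt
      exact hn (List.isChain_cons.mpr ⟨fun y hy => by simp at hy; subst hy; exact h, hdt⟩)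
    have := ih hnt
    simp only [List.length_cons] at this
    simp only [repF, if_neg h, List.length_cons]
    omega

theorem noDD_dotAdd (c : Char) (X : List Char) (h : NoDD X) : NoDD (dotAdd c X) := by
  unfold dotAdd
  by_cases hc : c = '.' ∧ X.head? = some '.'
  · simpa [hc]
  · simp only [if_neg hc]
    refine List.isChain_cons.mpr ⟨?_, h⟩
    intro y hy hcy
    exact hc ⟨hcy.1, by rw [hy]; exact congrArg some hcy.2⟩

theorem noDD_coll (l : List Char) : NoDD (coll l) := by
  induction l with
  | nil => exact List.isChain_nil
  | cons c t ih => exact noDD_dotAdd c (coll t) ih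

theorem coll_of_noDD : ∀ l : List Char, NoDD l → coll l = l := by
  intro l
  induction l with
  | nil => intro _; rfl
  | cons c t ih =>
    intro h
    obtain ⟨hp, ht⟩ := noDD_tail_pair h
    rw [coll_cons, ih ht]
    unfold dotAdd
    by_cases hc : c = '.' ∧ t.head? = some '.'
    · exact absurd ⟨hc.1, rfl⟩ (hp '.' hc.2)
    · simp [hc]

theorem foldl_const_range (f : List Char → List Char) (n : Nat) (s : List Char) :
    (List.range n).foldl (fun t _ => f t) s = f^[n] s := by
  induction n generalizing s with
  | zero => rfl
  | succ m ih =>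
    rw [List.range_succ, List.foldl_append, ih, Function.iterate_succ_apply']
    rfl

theorem iter_repF_coll : ∀ (n : Nat) (s : List Char), s.length ≤ n → repF^[n] s = coll s := by
  intro n
  induction n with
  | zero =>
    intro s h
    have : s = [] := List.length_eq_zero_iff.mp (Nat.le_zero.mp h)
    subst this; rfl
  | succ m ih =>
    intro s h
    by_cases hn : NoDD s
    · rw [Function.iterate_fixed (repF_of_noDD s hn), coll_of_noDD s hn]
    · rw [Function.iterate_succ_apply, ih (repF s) (by have := repF_len_lt s hn; omega),
        coll_repF]

-- ---- B side ----

theorem bstep_skip (out : List Char) (c : Char) (h : pA c = false) : bstep out c = out := by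
  unfold pA at h
  unfold bstep
  simp only [Bool.or_eq_false_iff, decide_eq_false_iff_not] at h
  rw [if_neg (by simp [h.1.1.1, h.1.1.2, h.1.2]), if_neg (by intro hc; exact h.2 hc.1)]

theorem foldl_bstep_filter : ∀ (l : List Char) (out : List Char),
    l.foldl bstep out = (l.filter pA).foldl bstep out := by
  intro l
  induction l with
  | nil => intro out; rfl
  | cons c t ih =>
    intro out
    by_cases h : pA c = true
    · simp [h, List.foldl_cons, ih]
    · simp only [Bool.not_eq_true] at h
      simp [h, List.foldl_cons, bstep_skip out c h, ih]

-- continuation of B's scan once out is nonempty; the Bool is "out currently ends in '.'"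
def tailRun : Bool → List Char → List Char
  | _, [] => []
  | pd, c :: t =>
    if PySem.Chars.isalnum c || c = '-' || c = '_' then c :: tailRun false t
    else if c = '.' ∧ pd = false then '.' :: tailRun true t
    else tailRun pd t

def lead : List Char → List Char
  | [] => []
  | c :: t => if c = '.' then lead t else c :: tailRun false t

theorem pA_dot_cases {c : Char} (h : pA c = true) :
    (PySem.Chars.isalnum c || c = '-' || c = '_') = true ∨ c = '.' := by
  unfold pA at h
  rcases Bool.or_eq_true_iff.mp h with h1 | h1
  · left; simpa using h1
  · right; simpa using h1

theorem alnum_ne_dot {c : Char} (h : (PySem.Chars.isalnum c || c = '-' || c = '_') = true) :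
    c ≠ '.' := by
  rcases Bool.or_eq_true_iff.mp h with h1 | h1
  · rcases Bool.or_eq_true_iff.mp h1 with h2 | h2
    · intro hc; subst hc
      simp [PySem.Chars.isalnum, PySem.Chars.isalpha, PySem.Chars.isdigit,
        PySem.Chars.isupper, PySem.Chars.islower] at h2
    · intro hc; subst hc; simp at h2
  · intro hc; subst hc; simp at h1

theorem dot_skip : (PySem.Chars.isalnum '.' || '.' = '-' || '.' = '_') = false := by decide

theorem bstep_append (out : List Char) {c : Char}
    (h1 : (PySem.Chars.isalnum c || c = '-' || c = '_') = true) :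
    bstep out c = out ++ [c] := by
  unfold bstep; rw [if_pos h1]

theorem bstep_dot (out : List Char) :
    bstep out '.' = if out ≠ [] ∧ out.getLast? ≠ some '.' then out ++ ['.'] else out := by
  unfold bstep
  rw [if_neg (by rw [dot_skip]; exact Bool.false_ne_true)]
  by_cases h : out ≠ [] ∧ out.getLast? ≠ some '.'
  · rw [if_pos ⟨rfl, h⟩, if_pos h]
  · rw [if_neg (fun hp => h ⟨hp.2.1, hp.2.2⟩), if_neg h]

theorem tailRun_append {c : Char} (pd : Bool) (t : List Char)
    (h1 : (PySem.Chars.isalnum c || c = '-' || c = '_') = true) :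
    tailRun pd (c :: t) = c :: tailRun false t := by
  simp only [tailRun]; rw [if_pos h1]

theorem tailRun_dot (pd : Bool) (t : List Char) :
    tailRun pd ('.' :: t) = if pd = false then '.' :: tailRun true t else tailRun pd t := by
  simp only [tailRun]
  rw [if_neg (by rw [dot_skip]; exact Bool.false_ne_true)]
  by_cases h : pd = false
  · rw [if_pos ⟨trivial, h⟩, if_pos h]
  · rw [if_neg (fun hp => h hp.2), if_neg h]

theorem foldl_bstep_nonempty : ∀ (t : List Char) (out : List Char), out ≠ [] →
    (∀ c ∈ t, pA c = true) →
    t.foldl bstep out = out ++ tailRun (out.getLast? == some '.') t := by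
  intro t
  induction t with
  | nil => intro out _ _; simp [tailRun]
  | cons c t ih =>
    intro out hne hall
    have hc := hall c List.mem_cons_self
    have hall' : ∀ x ∈ t, pA x = true := fun x hx => hall x (List.mem_cons_of_mem c hx)
    rcases pA_dot_cases hc with h1 | h1
    · have hcd := alnum_ne_dot h1
      rw [List.foldl_cons, bstep_append out h1, ih (out ++ [c]) (by simp) hall',
        tailRun_append _ _ h1]
      have hlast : (out ++ [c]).getLast? = some c := by simp
      rw [hlast, show (some c == some ('.' : Char)) = false by simpa using hcd]
      simp [List.append_assoc]
    · subst h1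
      rw [List.foldl_cons, bstep_dot out, tailRun_dot]
      by_cases hpd : out.getLast? = some '.'
      · rw [if_neg (fun hp => hp.2 hpd), ih out hne hall',
          show (out.getLast? == some ('.' : Char)) = true by simpa using hpd,
          if_neg (by simp)]
      · rw [if_pos ⟨hne, hpd⟩, ih (out ++ ['.']) (by simp) hall']
        have hlast : (out ++ ['.']).getLast? = some ('.' : Char) := by simp
        rw [hlast, show (out.getLast? == some ('.' : Char)) = false by simpa using hpd,
          if_pos rfl, show (some ('.' : Char) == some ('.' : Char)) = true by simp]
        simp [List.append_assoc]

theorem foldl_bstep_lead : ∀ (t : List Char), (∀ c ∈ t, pA c = true) →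
    t.foldl bstep [] = lead t := by
  intro t
  induction t with
  | nil => intro _; rfl
  | cons c t ih =>
    intro hall
    have hc := hall c List.mem_cons_self
    have hall' : ∀ x ∈ t, pA x = true := fun x hx => hall x (List.mem_cons_of_mem c hx)
    rcases pA_dot_cases hc with h1 | h1
    · have hcd := alnum_ne_dot h1
      rw [List.foldl_cons, bstep_append [] h1, List.nil_append,
        foldl_bstep_nonempty t [c] (by simp) hall',
        show (([c] : List Char).getLast? == some ('.' : Char)) = false by simpa using hcd]
      simp [lead, hcd]
    · subst h1
      rw [List.foldl_cons, bstep_dot [], if_neg (fun hp => hp.1 rfl)]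
      have hl : lead ('.' :: t) = lead t := by simp [lead]
      rw [hl]
      exact ih hall'

theorem tailRun_coll : ∀ t : List Char, (∀ c ∈ t, pA c = true) →
    tailRun false t = coll t ∧ '.' :: tailRun true t = dotAdd '.' (coll t) := by
  intro t
  induction t with
  | nil => exact fun _ => ⟨rfl, rfl⟩
  | cons c t ih =>
    intro hall
    have hc := hall c List.mem_cons_self
    have hall' : ∀ x ∈ t, pA x = true := fun x hx => hall x (List.mem_cons_of_mem c hx)
    obtain ⟨ih1, ih2⟩ := ih hall'
    rcases pA_dot_cases hc with h1 | h1
    · have hcd := alnum_ne_dot h1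
      have hAdd : dotAdd c (coll t) = c :: coll t := by
        unfold dotAdd; rw [if_neg (fun h => hcd h.1)]
      constructor
      · rw [tailRun_append _ _ h1, ih1, coll_cons, hAdd]
      · rw [tailRun_append _ _ h1, ih1, coll_cons, hAdd]
        unfold dotAdd
        rw [if_neg (by simp [hcd])]
    · subst h1
      constructor
      · rw [tailRun_dot, if_pos rfl, coll_cons]
        exact ih2
      · rw [tailRun_dot, if_neg (by simp), coll_cons, ih2, dotAdd_dot_idem]

theorem stripL_dotAdd_dot (X : List Char) : stripL (dotAdd '.' X) = stripL X := by
  unfold dotAdd stripL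
  by_cases h : X.head? = some '.'
  · simp [h]
  · simp [h]

theorem lead_eq : ∀ t : List Char, (∀ c ∈ t, pA c = true) → lead t = stripL (coll t) := by
  intro t
  induction t with
  | nil => intro _; rfl
  | cons c t ih =>
    intro hall
    have hc := hall c List.mem_cons_self
    have hall' : ∀ x ∈ t, pA x = true := fun x hx => hall x (List.mem_cons_of_mem c hx)
    rcases pA_dot_cases hc with h1 | h1
    · have hcd := alnum_ne_dot h1
      have hAdd : dotAdd c (coll t) = c :: coll t := by
        unfold dotAdd; rw [if_neg (fun h => hcd h.1)]
      rw [show lead (c :: t) = c :: tailRun false t by simp [lead, hcd],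
        (tailRun_coll t hall').1, coll_cons, hAdd]
      unfold stripL
      rw [if_neg (by simp [hcd])]
    · subst h1
      rw [show lead ('.' :: t) = lead t by simp [lead], ih hall', coll_cons, stripL_dotAdd_dot]

-- A's filter predicate is B's pA
theorem predA_eq_pA (c : Char) :
    (PySem.Chars.isdigit c || PySem.Chars.isalpha c || PySem.Chars.isIn [c] ['-', '_', '.']) = pA c := by
  have hmem : PySem.Chars.isIn [c] ['-', '_', '.'] = (c = '-' || c = '_' || c = '.') := by
    by_cases h : c = '-' ∨ c = '_' ∨ c = '.'
    · have : [c] <:+: ['-', '_', '.'] := by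
        rcases h with h | h | h <;> subst h
        · exact ⟨[], ['_', '.'], rfl⟩
        · exact ⟨['-'], ['.'], rfl⟩
        · exact ⟨['-', '_'], [], rfl⟩
      rw [(PySem.Chars.isIn_iff_infix _ _).mpr this]
      rcases h with h | h | h <;> simp [h]
    · rw [not_or, not_or] at h
      obtain ⟨h1, h2, h3⟩ := h
      have : ¬ ([c] <:+: ['-', '_', '.']) := by
        intro hinf
        have : c ∈ ['-', '_', '.'] := hinf.mem List.mem_cons_self
        simp at this
        tauto
      have hfalse : PySem.Chars.isIn [c] ['-', '_', '.'] = false := by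
        rcases hb : PySem.Chars.isIn [c] ['-', '_', '.'] with _ | _
        · rfl
        · exact absurd ((PySem.Chars.isIn_iff_infix _ _).mp hb) this
      rw [hfalse]
      simp [h1, h2, h3]
  rw [hmem]
  unfold pA PySem.Chars.isalnum
  cases hd : PySem.Chars.isdigit c <;> cases ha : PySem.Chars.isalpha c <;> simp

-- ---- facts about u := stripR (stripL (coll t)) ----

theorem noDD_stripL {s : List Char} (h : NoDD s) : NoDD (stripL s) := by
  unfold stripL
  by_cases hh : s.head? = some '.'
  · rw [if_pos hh]; exact List.IsChain.tail h
  · rwa [if_neg hh]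

theorem head_stripL {s : List Char} (h : NoDD s) : (stripL s).head? ≠ some '.' := by
  unfold stripL
  cases s with
  | nil => simp
  | cons c t =>
    by_cases hc : c = '.'
    · subst hc
      simp only [List.head?_cons, List.tail_cons]
      intro hh
      exact (noDD_tail_pair h).1 '.' hh ⟨rfl, rfl⟩
    · simp [hc]

theorem stripR_props {s : List Char} (h : NoDD s) (hh : s.head? ≠ some '.') :
    (stripR s).getLast? ≠ some '.' ∧ (stripR s).head? ≠ some '.' := by
  unfold stripR
  by_cases hl : s.getLast? = some '.'
  · rw [if_pos hl]
    have hne : s ≠ [] := fun he => by subst he; simp at hl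
    have hglast : s.getLast hne = '.' := by
      rw [List.getLast?_eq_some_getLast hne] at hl
      exact Option.some.inj hl
    constructor
    · intro hc
      have hchain : List.IsChain (fun a b => ¬(a = '.' ∧ b = '.'))
          (s.dropLast ++ [s.getLast hne]) := by
        rw [List.dropLast_concat_getLast hne]; exact h
      rw [List.isChain_append] at hchain
      exact hchain.2.2 '.' hc '.' (by simp [hglast]) ⟨rfl, rfl⟩
    · intro hc
      cases s with
      | nil => simp at hl
      | cons a t =>
        cases t with
        | nil => simp at hc
        | cons b t' =>
          have hda : (a :: b :: t').dropLast.head? = some a := by simp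
          rw [hda] at hc
          exact hh (by simpa using hc)
  · rw [if_neg hl]; exact ⟨hl, hh⟩

theorem noDD_filter_coll_props (t : List Char) :
    (stripR (stripL (coll t))).getLast? ≠ some '.' ∧ (stripR (stripL (coll t))).head? ≠ some '.' :=
  stripR_props (noDD_stripL (noDD_coll t)) (head_stripL (noDD_coll t))

-- phase4 is stripR ∘ stripL
theorem stripL_eq (s : List Char) :
    (if s ≠ [] ∧ PySem.List.pyGet? s 0 = some '.' then PySem.List.slice s (some 1) none else s)
      = stripL s := by
  have hget0 : PySem.List.pyGet? s 0 = s.head? := by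
    simp [pysem, List.head?_eq_getElem?]
  rw [hget0]
  unfold stripL
  by_cases hh : s.head? = some '.'
  · rw [if_pos ⟨fun he => by subst he; simp at hh, hh⟩, if_pos hh]
    simp [pysem]
  · rw [if_neg (fun hp => hh hp.2), if_neg hh]

theorem stripR_eq (u : List Char) :
    (if u ≠ [] ∧ PySem.List.pyGet? u (-1) = some '.' then PySem.List.slice u none (some (-1)) else u)
      = stripR u := by
  have hg : PySem.List.pyGet? u (-1) = u.getLast? := by simp [pysem]
  rw [hg]
  unfold stripR
  by_cases hl : u.getLast? = some '.'
  · rw [if_pos ⟨fun he => by subst he; simp at hl, hl⟩, if_pos hl]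
    simp [pysem]
  · rw [if_neg (fun hp => hl hp.2), if_neg hl]

theorem phase4_eq (s : List Char) : phase4 s = stripR (stripL s) := by
  simp only [phase4]
  rw [stripL_eq, stripR_eq]

-- padding: s + s[-1]*(3-len)  =  (s + [s[-1]]*3)[:3]  for nonempty s of length < 3
theorem pad_eq (s : List Char) (c : Char) (hl : s.getLast? = some c) (h2 : s.length ≤ 2) :
    s ++ List.replicate (3 - s.length) c = (s ++ List.replicate 3 c).take 3 := by
  match s with
  | [] => simp at hl
  | [a] =>
    simp at hl
    subst hl
    simp [List.replicate, List.take]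
  | [a, b] =>
    simp at hl
    subst hl
    simp [List.replicate, List.take]
  | a :: b :: d :: t => simp at h2

-- the common tail: phases 5–7 of A = B's truncate/strip/'a'/pad stage, for any u with no
-- leading and no trailing dot
theorem final_eq (u : List Char) (hh : u.head? ≠ some '.') (hl : u.getLast? ≠ some '.') :
    (let s5 := if u = [] then ['a'] else u
     let s6 := if 16 ≤ s5.length then stripR (stripL (s5.take 15)) else s5
     if s6.length ≤ 2 then
       s6 ++ (match PySem.List.pyGet? s6 (-1) with
              | some c => List.replicate (3 - s6.length) c
              | none => [])
     else s6)
    =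
    (let out2 := u.take 15
     let out3 := if out2 ≠ [] ∧ out2.getLast? = some '.' then out2.dropLast else out2
     let out4 := if out3 = [] then ['a'] else out3
     if out4.length < 3 then
       (out4 ++ (match out4.getLast? with | some c => List.replicate 3 c | none => [])).take 3
     else out4) := by
  dsimp only
  by_cases hu : u = []
  · subst hu
    simp [pysem, List.take]
  · rw [if_neg hu]
    have hune : u.length ≠ 0 := by simpa [List.length_eq_zero_iff] using hu
    by_cases h15 : u.length ≤ 15
    · have htake : u.take 15 = u := List.take_of_length_le (by omega)
      have h16 : ¬ 16 ≤ u.length := by omega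
      rw [if_neg h16]
      have hB3 : (if u.take 15 ≠ [] ∧ (u.take 15).getLast? = some '.'
          then (u.take 15).dropLast else u.take 15) = u := by
        rw [htake, if_neg (fun hp => hl hp.2)]
      rw [hB3, if_neg hu]
      obtain ⟨c, hc⟩ := Option.ne_none_iff_exists'.mp
        (fun hn => hu (List.getLast?_eq_none_iff.mp hn))
      have hget : PySem.List.pyGet? u (-1) = u.getLast? := by simp [pysem]
      rw [hget, hc]
      by_cases hlen : u.length ≤ 2
      · rw [if_pos hlen, if_pos (show u.length < 3 by omega)]
        exact pad_eq u c hc hlen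
      · rw [if_neg hlen, if_neg (show ¬ u.length < 3 by omega)]
    · -- length ≥ 16: truncate to 15, then both sides strip the same possible trailing dot
      have h16 : 16 ≤ u.length := by omega
      rw [if_pos h16]
      have hlen15 : (u.take 15).length = 15 := by
        rw [List.length_take]; omega
      have htne : u.take 15 ≠ [] := fun he => by rw [he] at hlen15; simp at hlen15
      have hheadtake : (u.take 15).head? = u.head? := by
        cases u with
        | nil => exact absurd rfl hu
        | cons a t => simp [List.take]
      have hstripL : stripL (u.take 15) = u.take 15 := by
        unfold stripL
        rw [if_neg (by rw [hheadtake]; exact hh)]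
      rw [hstripL]
      by_cases hdot : (u.take 15).getLast? = some '.'
      · have hA : stripR (u.take 15) = (u.take 15).dropLast := by
          unfold stripR; rw [if_pos hdot]
        have hB3 : (if u.take 15 ≠ [] ∧ (u.take 15).getLast? = some '.'
            then (u.take 15).dropLast else u.take 15) = (u.take 15).dropLast := by
          rw [if_pos ⟨htne, hdot⟩]
        rw [hA, hB3]
        have hlen14 : (u.take 15).dropLast.length = 14 := by
          rw [List.length_dropLast, hlen15]
        rw [if_neg (show ¬ (u.take 15).dropLast = [] from
              fun he => by rw [he] at hlen14; simp at hlen14),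
          if_neg (show ¬ (u.take 15).dropLast.length ≤ 2 by omega),
          if_neg (show ¬ (u.take 15).dropLast.length < 3 by omega)]
      · have hA : stripR (u.take 15) = u.take 15 := by
          unfold stripR; rw [if_neg hdot]
        have hB3 : (if u.take 15 ≠ [] ∧ (u.take 15).getLast? = some '.'
            then (u.take 15).dropLast else u.take 15) = u.take 15 := by
          rw [if_neg (fun hp => hdot hp.2)]
        rw [hA, hB3, if_neg htne,
          if_neg (show ¬ (u.take 15).length ≤ 2 by omega),
          if_neg (show ¬ (u.take 15).length < 3 by omega)]

-- ===== VERDICT (by name: the statement is the Claim_ definition above) =====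
theorem solution_spec : Claim_equal_solution := by
  unfold Claim_equal_solution Spec_solution
  intro new_id _
  unfold solution solution_alt
  simp only []
  -- phase 2: join of singletons is the filtered list; A's predicate is pA
  rw [PySem.Chars.join_nil_singletons]
  rw [List.filter_congr (fun c _ => predA_eq_pA c)]
  set t0 := PySem.Chars.lower new_id.toList with ht0
  set t := t0.filter pA with ht
  have hall : ∀ c ∈ t, pA c = true := fun c hc => List.of_mem_filter hc
  -- A's phase 3 is coll t
  have hA3 : (List.range t.length).foldl (fun s _ => PySem.Chars.replace s ['.', '.'] ['.']) t = coll t := by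
    have hfun : (fun (s : List Char) (_ : Nat) => PySem.Chars.replace s ['.', '.'] ['.'])
        = fun (s : List Char) (_ : Nat) => repF s := by
      funext s i; exact replace_eq_repF s
    rw [hfun, foldl_const_range repF t.length t, iter_repF_coll t.length t le_rfl]
  rw [hA3]
  -- B's scan is stripL (coll t)
  have hB : t0.foldl bstep [] = stripL (coll t) := by
    rw [foldl_bstep_filter t0 [], ← ht, foldl_bstep_lead t hall, lead_eq t hall]
  rw [hB]
  -- both then strip one trailing dot: phase4 = stripR ∘ stripL, B's pop = stripR
  rw [phase4_eq]
  have hpop : (if stripL (coll t) ≠ [] ∧ (stripL (coll t)).getLast? = some '.'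
      then (stripL (coll t)).dropLast else stripL (coll t)) = stripR (stripL (coll t)) := by
    unfold stripR
    by_cases hd : (stripL (coll t)).getLast? = some '.'
    · rw [if_pos ⟨by intro he; rw [he] at hd; simp at hd, hd⟩, if_pos hd]
    · rw [if_neg (by intro hp; exact hd hp.2), if_neg hd]
  rw [hpop]
  -- A's phase 6 slice is take 15, and phase4 is stripR ∘ stripL (everywhere)
  have hslice : ∀ s : List Char, PySem.List.slice s none (some 15) = s.take 15 := by
    intro s; simp [pysem]
  simp only [hslice, phase4_eq]
  -- common tail
  obtain ⟨hlast, hhead⟩ := noDD_filter_coll_props t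
  exact congrArg String.ofList (final_eq (stripR (stripL (coll t))) hhead hlast)
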